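-- pv_equiv track=rewrite | github.com/svenedik/cli-usage-bar | src/cli_usage_bar/config.py | _set_toml_value
-- ===== SOURCE A (Python) =====
-- def _set_toml_value(text: str, section: str, key: str, value: str) -> str:
--     """Naive single-value TOML setter for known keys. Preserves surrounding lines."""
--     lines = text.splitlines(keepends=True)
--     in_section = False
--     written = False
--     out: list[str] = []
--     for line in lines:
--         stripped = line.strip()
--         if stripped.startswith("[") and stripped.endswith("]"):
--             if in_section and not written:
--                 out.append(f"{key} = {value}\n")
--                 written = True
--             in_section = stripped == f"[{section}]"
--         elif in_section and stripped.startswith(f"{key}") and "=" in stripped: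
--             prefix = line[: len(line) - len(line.lstrip())]
--             # Preserve inline comment if present
--             comment = ""
--             if "#" in line:
--                 comment = "  " + line[line.index("#") :].rstrip()
--             out.append(f"{prefix}{key} = {value}{comment}\n")
--             written = True
--             continue
--         out.append(line)
--     if in_section and not written:
--         if out and not out[-1].endswith("\n"):
--             out[-1] = out[-1] + "\n"
--         out.append(f"{key} = {value}\n")
--     return "".join(out)
-- ===== SOURCE B (Python) =====
-- def _is_header(line: str) -> bool:
--     s = line.strip()
--     return s.startswith("[") and s.endswith("]")
--
--
-- def _matches(line: str, key: str) -> bool: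
--     s = line.strip()
--     return s.startswith(key) and "=" in s
--
--
-- def _rewrite(line: str, key: str, value: str) -> str:
--     prefix = line[: len(line) - len(line.lstrip())]
--     comment = ""
--     if "#" in line:
--         comment = "  " + line[line.index("#") :].rstrip()
--     return f"{prefix}{key} = {value}{comment}\n"
--
--
-- def _later(tail: list, header: str, key: str, value: str) -> list:
--     # lines from the next section header onward: only rewrite matching
--     # lines inside further occurrences of the target section
--     out = []
--     in_sec = False
--     for ln in tail:
--         if _is_header(ln):
--             in_sec = ln.strip() == header
--             out.append(ln)
--         elif in_sec and _matches(ln, key):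
--             out.append(_rewrite(ln, key, value))
--         else:
--             out.append(ln)
--     return out
--
--
-- def _set_toml_value(text: str, section: str, key: str, value: str) -> str:
--     """Naive single-value TOML setter for known keys. Preserves surrounding lines."""
--     lines = text.splitlines(keepends=True)
--     header = f"[{section}]"
--     idx = next((j for j, ln in enumerate(lines) if ln.strip() == header), None)
--     if idx is None:
--         return text
--     head = lines[: idx + 1]
--     rest = lines[idx + 1 :]
--     block_end = next((j for j, ln in enumerate(rest) if _is_header(ln)), len(rest))
--     first = rest[:block_end]
--     block = [_rewrite(ln, key, value) if _matches(ln, key) else ln for ln in first]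
--     replaced = any(_matches(ln, key) for ln in first)
--     tail = rest[block_end:]
--     new_line = f"{key} = {value}\n"
--     if tail:
--         mid = [] if replaced else [new_line]
--         return "".join(head + block + mid + _later(tail, header, key, value))
--     body = head + block
--     if replaced:
--         return "".join(body)
--     if body and not body[-1].endswith("\n"):
--         body[-1] = body[-1] + "\n"
--     return "".join(body + [new_line])
-- ===== Notes on version B (the rewrite author's own statement) =====
-- stated objective: alternative
-- what changed: A tracks in_section/written flags in one line-by-line loop; B instead slices the text into phases by index search (prefix up to the first '[section]' header, the first block up to the next header, the remainder), rewrites the first block with a map, inserts the new key line at the computed block end, and only then handles later duplicate sections.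
import Mathlib
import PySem

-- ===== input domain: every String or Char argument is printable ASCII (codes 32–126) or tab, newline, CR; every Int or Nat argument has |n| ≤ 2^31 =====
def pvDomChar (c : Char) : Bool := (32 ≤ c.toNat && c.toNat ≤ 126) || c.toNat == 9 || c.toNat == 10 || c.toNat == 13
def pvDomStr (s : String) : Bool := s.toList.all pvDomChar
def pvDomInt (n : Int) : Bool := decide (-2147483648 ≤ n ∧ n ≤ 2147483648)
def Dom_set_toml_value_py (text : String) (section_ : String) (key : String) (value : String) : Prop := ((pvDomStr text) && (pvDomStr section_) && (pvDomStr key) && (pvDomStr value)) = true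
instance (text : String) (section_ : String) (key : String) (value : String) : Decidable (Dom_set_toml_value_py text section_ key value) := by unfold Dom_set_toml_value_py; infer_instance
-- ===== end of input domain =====

-- B is an alternative decomposition of A's single flag-tracking loop: it slices the text into
-- phases (prefix up to the first target header / first block / remainder) found by index search,
-- rewrites the first block with a map, and inserts at the computed block end; same return value.

-- shared primitive: str.splitlines(keepends=True) — exact on Dom (the only line breaks there are \n, \r, \r\n)
def pvLinesKE : List Char → List Char → List (List Char)
  | acc, [] => if acc.isEmpty then [] else [acc.reverse]
  | acc, '\r' :: '\n' :: rest => (acc.reverse ++ ['\r', '\n']) :: pvLinesKE [] rest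
  | acc, '\r' :: rest => (acc.reverse ++ ['\r']) :: pvLinesKE [] rest
  | acc, '\n' :: rest => (acc.reverse ++ ['\n']) :: pvLinesKE [] rest
  | acc, c :: rest => pvLinesKE (c :: acc) rest

-- shared: the inserted line f"{key} = {value}\n" (A writes it inline; B's f-string is identical)
def pvNewLine (key value : List Char) : List Char := key ++ (' ' :: '=' :: ' ' :: value) ++ ['\n']

-- shared: the rewritten assignment line (A's inline block; B's _rewrite helper has the same body)
def pvRewrite (key value line : List Char) : List Char :=
  let prefx := line.take (line.length - (PySem.Chars.lstrip line).length)
  let comment := if PySem.Chars.isIn ['#'] line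
    then ' ' :: ' ' :: PySem.Chars.rstrip (line.drop (PySem.Chars.find line ['#']).toNat)
    else []
  prefx ++ key ++ (' ' :: '=' :: ' ' :: value) ++ comment ++ ['\n']

-- ===== PORT A =====
-- A's loop body: state = (in_section, written, out)
def pvStepA (section_ key value : List Char) (st : Bool × Bool × List (List Char)) (line : List Char) : Bool × Bool × List (List Char) :=
  let stripped := PySem.Chars.strip line
  if PySem.Chars.startswith stripped ['['] && PySem.Chars.endswith stripped [']'] then
    if st.1 && !st.2.1 then
      (stripped == '[' :: (section_ ++ [']']), true, st.2.2 ++ [pvNewLine key value, line])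
    else
      (stripped == '[' :: (section_ ++ [']']), st.2.1, st.2.2 ++ [line])
  else if st.1 && PySem.Chars.startswith stripped key && PySem.Chars.isIn ['='] stripped then
    (st.1, true, st.2.2 ++ [pvRewrite key value line])
  else
    (st.1, st.2.1, st.2.2 ++ [line])

def set_toml_value_py (text : String) (section_ : String) (key : String) (value : String) : String :=
  let lines := pvLinesKE [] text.toList
  let st := lines.foldl (pvStepA section_.toList key.toList value.toList) (false, false, [])
  let out :=
    if st.1 && !st.2.1 then
      let o := if !st.2.2.isEmpty && !PySem.Chars.endswith (st.2.2.getLastD []) ['\n']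
        then st.2.2.dropLast ++ [st.2.2.getLastD [] ++ ['\n']] else st.2.2
      o ++ [pvNewLine key.toList value.toList]
    else st.2.2
  String.ofList (PySem.Chars.join [] out)

-- ===== PORT B =====
def pvIsHeader (line : List Char) : Bool :=
  let s := PySem.Chars.strip line
  PySem.Chars.startswith s ['['] && PySem.Chars.endswith s [']']

def pvMatches (key line : List Char) : Bool :=
  let s := PySem.Chars.strip line
  PySem.Chars.startswith s key && PySem.Chars.isIn ['='] s

-- B's _later loop body: state = (in_sec, out)
def pvLaterStep (header key value : List Char) (st : Bool × List (List Char)) (ln : List Char) : Bool × List (List Char) :=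
  if pvIsHeader ln then (PySem.Chars.strip ln == header, st.2 ++ [ln])
  else if st.1 && pvMatches key ln then (st.1, st.2 ++ [pvRewrite key value ln])
  else (st.1, st.2 ++ [ln])

def set_toml_value_py_alt (text : String) (section_ : String) (key : String) (value : String) : String :=
  let lines := pvLinesKE [] text.toList
  let header := '[' :: (section_.toList ++ [']'])
  match List.findIdx? (fun l => PySem.Chars.strip l == header) lines with
  | none => text
  | some i =>
    let head := lines.take (i+1)
    let rest := lines.drop (i+1)
    let blockEnd := (List.findIdx? pvIsHeader rest).getD rest.length
    let first := rest.take blockEnd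
    let block := first.map (fun ln => if pvMatches key.toList ln then pvRewrite key.toList value.toList ln else ln)
    let replaced := first.any (pvMatches key.toList)
    let tail := rest.drop blockEnd
    let newLine := pvNewLine key.toList value.toList
    if tail.isEmpty then
      if replaced then String.ofList (PySem.Chars.join [] (head ++ block))
      else
        let body := head ++ block
        let body2 := if !body.isEmpty && !PySem.Chars.endswith (body.getLastD []) ['\n']
          then body.dropLast ++ [body.getLastD [] ++ ['\n']] else body
        String.ofList (PySem.Chars.join [] (body2 ++ [newLine]))
    else
      let mid := if replaced then ([] : List (List Char)) else [newLine]
      String.ofList (PySem.Chars.join [] (head ++ block ++ mid ++ (tail.foldl (pvLaterStep header key.toList value.toList) (false, [])).2))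

-- ===== PRECONDITION & SPEC =====
def Spec_set_toml_value_py (text : String) (section_ : String) (key : String) (value : String) (out : String) : Prop := out = set_toml_value_py_alt text section_ key value
instance (text : String) (section_ : String) (key : String) (value : String) (out : String) : Decidable (Spec_set_toml_value_py text section_ key value out) := by unfold Spec_set_toml_value_py; infer_instance

-- ===== CLAIM (what is proved, stated in full; the proofs are below) =====
def Claim_equal_set_toml_value_py : Prop := ∀ (text : String) (section_ : String) (key : String) (value : String), Dom_set_toml_value_py text section_ key value → Spec_set_toml_value_py text section_ key value (set_toml_value_py text section_ key value)

-- ===== LEMMAS AND PROOFS =====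

-- "".join is concatenation
theorem pvJoinNil_eq_flatten (L : List (List Char)) : PySem.Chars.join [] L = L.flatten := by
  match L with
  | [] => simp [PySem.Chars.join_nil]
  | [p] => simp [PySem.Chars.join_singleton]
  | p :: q :: rest =>
    rw [PySem.Chars.join_cons_cons, pvJoinNil_eq_flatten (q :: rest)]
    simp

-- splitlines(keepends=True) concatenates back to the original string
theorem pvLinesKE_flatten (acc cs : List Char) : (pvLinesKE acc cs).flatten = acc.reverse ++ cs := by
  fun_induction pvLinesKE acc cs <;> simp_all

-- a line whose strip equals "[section]" is recognized as a header
theorem pvTarget_isHeader (section_ l : List Char) (h : (PySem.Chars.strip l == '[' :: (section_ ++ [']'])) = true) : pvIsHeader l = true := by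
  have he : PySem.Chars.strip l = '[' :: (section_ ++ [']']) := by exact beq_iff_eq.mp h
  simp only [pvIsHeader, he, Bool.and_eq_true]
  constructor
  · rw [PySem.Chars.startswith_iff]; exact ⟨section_ ++ [']'], rfl⟩
  · rw [PySem.Chars.endswith_iff]; exact ⟨'[' :: section_, by simp⟩

-- phase 0: before the first target header, A copies lines and keeps in_section = false
theorem pvPhase0 (section_ key value : List Char) (ls : List (List Char)) (w : Bool) (out : List (List Char))
    (h : ∀ l ∈ ls, (PySem.Chars.strip l == '[' :: (section_ ++ [']'])) = false) :
    ls.foldl (pvStepA section_ key value) (false, w, out) = (false, w, out ++ ls) := by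
  induction ls generalizing out with
  | nil => simp
  | cons l ls ih =>
    have hl := h l (by simp)
    have hrest : ∀ x ∈ ls, (PySem.Chars.strip x == '[' :: (section_ ++ [']'])) = false := fun x hx => h x (by simp [hx])
    simp only [List.foldl_cons]
    have hstep : pvStepA section_ key value (false, w, out) l = (false, w, out ++ [l]) := by
      simp only [pvStepA, hl]
      split <;> simp
    rw [hstep, ih _ hrest]
    simp

-- phase 1: inside the target block (no headers), A rewrites matching lines and ORs the flag
theorem pvPhase1 (section_ key value : List Char) (ls : List (List Char)) (w : Bool) (out : List (List Char))
    (h : ∀ l ∈ ls, pvIsHeader l = false) :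
    ls.foldl (pvStepA section_ key value) (true, w, out) =
      (true, w || ls.any (pvMatches key),
       out ++ ls.map (fun ln => if pvMatches key ln then pvRewrite key value ln else ln)) := by
  induction ls generalizing w out with
  | nil => simp
  | cons l ls ih =>
    have hl := h l (by simp)
    have hrest : ∀ x ∈ ls, pvIsHeader x = false := fun x hx => h x (by simp [hx])
    simp only [List.foldl_cons]
    have hnh : (PySem.Chars.startswith (PySem.Chars.strip l) ['['] && PySem.Chars.endswith (PySem.Chars.strip l) [']']) = false := by
      simpa [pvIsHeader] using hl
    by_cases hm : pvMatches key l = true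
    · have hstep : pvStepA section_ key value (true, w, out) l = (true, true, out ++ [pvRewrite key value l]) := by
        simp only [pvStepA, hnh]
        have hm2 : (PySem.Chars.startswith (PySem.Chars.strip l) key && PySem.Chars.isIn ['='] (PySem.Chars.strip l)) = true := by simpa [pvMatches] using hm
        simp [hm2]
      rw [hstep, ih true _ hrest]
      simp [hm]
    · have hm' : pvMatches key l = false := by simpa using hm
      have hstep : pvStepA section_ key value (true, w, out) l = (true, w, out ++ [l]) := by
        simp only [pvStepA, hnh]
        have hm2 : (PySem.Chars.startswith (PySem.Chars.strip l) key && PySem.Chars.isIn ['='] (PySem.Chars.strip l)) = false := by simpa [pvMatches] using hm'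
        simp [hm2]
      rw [hstep, ih w _ hrest]
      simp [hm']

-- _later's fold with a nonempty accumulator
theorem pvLaterShift (header key value : List Char) (ls : List (List Char)) (b : Bool) (acc : List (List Char)) :
    ls.foldl (pvLaterStep header key value) (b, acc) =
      ((ls.foldl (pvLaterStep header key value) (b, [])).1,
       acc ++ (ls.foldl (pvLaterStep header key value) (b, [])).2) := by
  induction ls generalizing b acc with
  | nil => simp
  | cons l ls ih =>
    simp only [List.foldl_cons]
    have hstep : ∀ a, pvLaterStep header key value (b, a) l = ((pvLaterStep header key value (b, []) l).1, a ++ (pvLaterStep header key value (b, []) l).2) := by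
      intro a; simp only [pvLaterStep]; split <;> [simp; split <;> simp]
    rw [hstep acc, hstep []]
    rw [ih, ih ((pvLaterStep header key value (b, []) l).1) ([] ++ (pvLaterStep header key value (b, []) l).2)]
    simp

-- phase 2: once written, A's loop is B's _later loop
theorem pvPhase2 (section_ key value : List Char) (ls : List (List Char)) (b : Bool) (out : List (List Char)) :
    ls.foldl (pvStepA section_ key value) (b, true, out) =
      ((ls.foldl (pvLaterStep ('[' :: (section_ ++ [']'])) key value) (b, [])).1, true,
       out ++ (ls.foldl (pvLaterStep ('[' :: (section_ ++ [']'])) key value) (b, [])).2) := by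
  induction ls generalizing b out with
  | nil => simp
  | cons l ls ih =>
    simp only [List.foldl_cons]
    by_cases hh : pvIsHeader l = true
    · have hnh : (PySem.Chars.startswith (PySem.Chars.strip l) ['['] && PySem.Chars.endswith (PySem.Chars.strip l) [']']) = true := by
        simpa [pvIsHeader] using hh
      have h1 : pvStepA section_ key value (b, true, out) l = ((PySem.Chars.strip l == '[' :: (section_ ++ [']'])), true, out ++ [l]) := by
        simp [pvStepA, hnh]
      have h2 : pvLaterStep ('[' :: (section_ ++ [']'])) key value (b, []) l = ((PySem.Chars.strip l == '[' :: (section_ ++ [']'])), [l]) := by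
        simp [pvLaterStep, hh]
      rw [h1, h2, ih]
      rw [pvLaterShift _ _ _ ls _ [l]]
      simp
    · have hnh : (PySem.Chars.startswith (PySem.Chars.strip l) ['['] && PySem.Chars.endswith (PySem.Chars.strip l) [']']) = false := by
        simp only [pvIsHeader] at hh; simpa using hh
      by_cases hm : (b && pvMatches key l) = true
      · have h1 : pvStepA section_ key value (b, true, out) l = (b, true, out ++ [pvRewrite key value l]) := by
          simp only [pvStepA, hnh]
          have hm2 : (b && (PySem.Chars.startswith (PySem.Chars.strip l) key && PySem.Chars.isIn ['='] (PySem.Chars.strip l))) = true := by simpa [pvMatches] using hm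
          simp only [← Bool.and_assoc] at hm2 ⊢
          simp [hm2]
        have h2 : pvLaterStep ('[' :: (section_ ++ [']'])) key value (b, []) l = (b, [pvRewrite key value l]) := by
          simp [pvLaterStep, hh, hm]
        rw [h1, h2, ih, pvLaterShift _ _ _ ls _ [pvRewrite key value l]]
        simp
      · have hm' : (b && pvMatches key l) = false := by simpa using hm
        have h1 : pvStepA section_ key value (b, true, out) l = (b, true, out ++ [l]) := by
          have hm2 : (b && (PySem.Chars.startswith (PySem.Chars.strip l) key && PySem.Chars.isIn ['='] (PySem.Chars.strip l))) = false := by simpa [pvMatches] using hm'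
          simp only [pvStepA, hnh]
          simp only [← Bool.and_assoc] at hm2 ⊢
          simp [hm2]
        have h2 : pvLaterStep ('[' :: (section_ ++ [']'])) key value (b, []) l = (b, [l]) := by
          simp [pvLaterStep, hh, hm']
        rw [h1, h2, ih, pvLaterShift _ _ _ ls _ [l]]
        simp

-- ===== VERDICT (by name: the statement is the Claim_ definition above) =====
theorem set_toml_value_py_spec : Claim_equal_set_toml_value_py := by
  intro text section_ key value _
  cases hfi : List.findIdx? (fun l => PySem.Chars.strip l == '[' :: (section_.toList ++ [']'])) (pvLinesKE [] text.toList) with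
  | none =>
    have hall : ∀ l ∈ pvLinesKE [] text.toList, (PySem.Chars.strip l == '[' :: (section_.toList ++ [']'])) = false := by
      simpa using List.findIdx?_eq_none_iff.mp hfi
    have hA := pvPhase0 section_.toList key.toList value.toList (pvLinesKE [] text.toList) false [] hall
    simp only [Spec_set_toml_value_py, set_toml_value_py, set_toml_value_py_alt, hfi, hA]
    simp [pvJoinNil_eq_flatten, pvLinesKE_flatten]
  | some i =>
    simp only [Spec_set_toml_value_py, set_toml_value_py, set_toml_value_py_alt, hfi]
    obtain ⟨hi, hpi, hbefore⟩ := List.findIdx?_eq_some_iff_getElem.mp hfi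
    generalize hg : pvLinesKE [] text.toList = ls at hi hpi hbefore ⊢
    have hpi' : (PySem.Chars.strip ls[i] == '[' :: (section_.toList ++ [']'])) = true := by
      simpa using hpi
    have hpre : ∀ l ∈ ls.take i, (PySem.Chars.strip l == '[' :: (section_.toList ++ [']'])) = false := by
      intro l hl
      obtain ⟨j, hj, rfl⟩ := List.mem_take_iff_getElem.mp hl
      simpa using hbefore j (by omega)
    have htake : ls.take (i+1) = ls.take i ++ [ls[i]] := by
      rw [List.take_add_one, List.getElem?_eq_getElem hi]
      simp
    have hih := pvTarget_isHeader section_.toList ls[i] hpi'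
    have hnh : (PySem.Chars.startswith (PySem.Chars.strip ls[i]) ['['] && PySem.Chars.endswith (PySem.Chars.strip ls[i]) [']']) = true := by
      simpa [pvIsHeader] using hih
    have hA1 : List.foldl (pvStepA section_.toList key.toList value.toList) (false, false, []) ls
        = List.foldl (pvStepA section_.toList key.toList value.toList) (true, false, ls.take i ++ [ls[i]]) (ls.drop (i+1)) := by
      conv_lhs => rw [← List.take_append_drop i ls, ← List.getElem_cons_drop hi]
      rw [List.foldl_append, pvPhase0 _ _ _ _ _ _ hpre, List.foldl_cons]
      congr 1
      simp [pvStepA, hnh, hpi']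
    rw [hA1, htake]
    cases hbe : List.findIdx? pvIsHeader (ls.drop (i+1)) with
    | none =>
      have hnb : ∀ l ∈ ls.drop (i+1), pvIsHeader l = false := by
        simpa using List.findIdx?_eq_none_iff.mp hbe
      rw [pvPhase1 _ _ _ _ _ _ hnb]
      simp only [Option.getD_none, List.take_length, List.drop_length, List.isEmpty_nil, Bool.false_or]
      by_cases hrep : (ls.drop (i+1)).any (pvMatches key.toList) = true
      · simp [hrep]
      · simp only [Bool.not_eq_true] at hrep
        simp [hrep]
    | some be =>
      obtain ⟨hbl, hbp, hbb⟩ := List.findIdx?_eq_some_iff_getElem.mp hbe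
      obtain ⟨a, lb, c, hrest, hfa, hlb, hlen⟩ :
          ∃ a lb c, List.drop (i+1) ls = a ++ lb :: c ∧ (∀ l ∈ a, pvIsHeader l = false) ∧
            pvIsHeader lb = true ∧ a.length = be := by
        refine ⟨List.take be (List.drop (i+1) ls), (List.drop (i+1) ls)[be], List.drop (be+1) (List.drop (i+1) ls), ?_, ?_, hbp, by have hbl' := hbl; simp only [List.length_drop] at hbl'; simp only [List.length_take, List.length_drop]; omega⟩
        · rw [List.getElem_cons_drop hbl, List.take_append_drop]
        · intro l hl
          obtain ⟨j, hj, hje⟩ := List.mem_take_iff_getElem.mp hl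
          have := hbb j (by omega)
          rw [hje] at this
          simpa using this
      have htakebe : List.take be (List.drop (i+1) ls) = a := by
        rw [hrest, ← hlen, List.take_left]
      have hdropbe : List.drop be (List.drop (i+1) ls) = lb :: c := by
        rw [hrest, ← hlen, List.drop_left]
      have hnh2 : (PySem.Chars.startswith (PySem.Chars.strip lb) ['['] && PySem.Chars.endswith (PySem.Chars.strip lb) [']']) = true := by
        simpa [pvIsHeader] using hlb
      have hB1 : pvLaterStep ('[' :: (section_.toList ++ [']'])) key.toList value.toList (false, []) lb
          = ((PySem.Chars.strip lb == '[' :: (section_.toList ++ [']'])), [lb]) := by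
        simp [pvLaterStep, hlb]
      conv_lhs => rw [hrest]
      rw [List.foldl_append, pvPhase1 _ _ _ _ _ _ hfa, List.foldl_cons]
      simp only [Bool.false_or, Option.getD_some, htakebe, hdropbe, List.isEmpty_cons]
      by_cases hrep : a.any (pvMatches key.toList) = true
      · have hstep : pvStepA section_.toList key.toList value.toList
            (true, true, (ls.take i ++ [ls[i]]) ++ a.map (fun ln => if pvMatches key.toList ln then pvRewrite key.toList value.toList ln else ln)) lb
            = ((PySem.Chars.strip lb == '[' :: (section_.toList ++ [']'])), true,
               ((ls.take i ++ [ls[i]]) ++ a.map (fun ln => if pvMatches key.toList ln then pvRewrite key.toList value.toList ln else ln)) ++ [lb]) := by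
          simp [pvStepA, hnh2]
        rw [hrep, hstep, pvPhase2]
        simp only [List.foldl_cons, hB1]
        rw [pvLaterShift _ _ _ _ _ [lb]]
        simp
      · simp only [Bool.not_eq_true] at hrep
        have hstep : pvStepA section_.toList key.toList value.toList
            (true, false, (ls.take i ++ [ls[i]]) ++ a.map (fun ln => if pvMatches key.toList ln then pvRewrite key.toList value.toList ln else ln)) lb
            = ((PySem.Chars.strip lb == '[' :: (section_.toList ++ [']'])), true,
               ((ls.take i ++ [ls[i]]) ++ a.map (fun ln => if pvMatches key.toList ln then pvRewrite key.toList value.toList ln else ln)) ++ [pvNewLine key.toList value.toList, lb]) := by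
          simp [pvStepA, hnh2]
        rw [hrep, hstep, pvPhase2]
        simp only [List.foldl_cons, hB1]
        rw [pvLaterShift _ _ _ _ _ [lb]]
        simp
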